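/- GENERATED by c/gen_decode.py: decode facts of the image, one per distinct instruction byte string. -/
import UserX.DecodeImage

#decode_all Vorbis.Dec
  "09c7"  -- or edi,eax
  "0f842adbffff"  -- je 113b22
  "0f84d9030000"  -- je 10fb20
  "0f87e1000000"  -- ja 113df7
  "0f8ec7000000"  -- jle 107a49
  "0fb6730c"  -- movzx esi,BYTE PTR [rbx+0xc]
  "394304"  -- cmp DWORD PTR [rbx+0x4],eax
  "410faf4608"  -- imul eax,DWORD PTR [r14+0x8]
  "4139cf"  -- cmp r15d,ecx
  "4183fd10"  -- cmp r13d,0x10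
  "418b1c24"  -- mov ebx,DWORD PTR [r12]
  "41c6450000"  -- mov BYTE PTR [r13+0x0],0x0
  "428d34ed00000000"  -- lea esi,[r13*8+0x0]
  "44397c2430"  -- cmp DWORD PTR [rsp+0x30],r15d
  "44896bdc"  -- mov DWORD PTR [rbx-0x24],r13d
  "4489e8"  -- mov eax,r13d
  "448b8524ffffff"  -- mov r8d,DWORD PTR [rbp-0xdc]
  "450fb7e4"  -- movzx r12d,r12w
  "4589f7"  -- mov r15d,r14d
  "48016b30"  -- add QWORD PTR [rbx+0x30],rbp
  "486354243c"  -- movsxd rdx,DWORD PTR [rsp+0x3c]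
  "4881ecb8000000"  -- sub rsp,0xb8
  "48890424"  -- mov QWORD PTR [rsp],rax
  "4889cb"  -- mov rbx,rcx
  "488b5c2468"  -- mov rbx,QWORD PTR [rsp+0x68]
  "488d148500000000"  -- lea rdx,[rax*4+0x0]
  "488d7b08"  -- lea rdi,[rbx+0x8]
  "488d7e70"  -- lea rdi,[rsi+0x70]
  "488dbbdc060000"  -- lea rdi,[rbx+0x6dc]
  "488dbfd5060000"  -- lea rdi,[rdi+0x6d5]
  "48c783a800000000000000"  -- mov QWORD PTR [rbx+0xa8],0x0
  "4963c6"  -- movsxd rax,r14d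
  "4989ed"  -- mov r13,rbp
  "498d7c24f4"  -- lea rdi,[r12-0xc]
  "498dbef0060000"  -- lea rdi,[r14+0x6f0]
  "4a8dbc23d4050000"  -- lea rdi,[rbx+r12*1+0x5d4]
  "4c39e8"  -- cmp rax,r13
  "4c89c7"  -- mov rdi,r8
  "4c8ba558ffffff"  -- mov r12,QWORD PTR [rbp-0xa8]
  "4c8db0b4000000"  -- lea r14,[rax+0xb4]
  "4d8d2c04"  -- lea r13,[r12+rax*1]
  "660f28e0"  -- movapd xmm4,xmm0
  "66410f6eee"  -- movd xmm5,r14d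
  "66837c5d0402"  -- cmp WORD PTR [rbp+rbx*2+0x4],0x2
  "7421"  -- je 106fb5
  "750d"  -- jne 10e44f
  "7761"  -- ja 115319
  "7e15"  -- jle 1082de
  "7fcb"  -- jg 10c92b
  "83bbdc06000000"  -- cmp DWORD PTR [rbx+0x6dc],0x0
  "8844241e"  -- mov BYTE PTR [rsp+0x1e],al
  "8975b8"  -- mov DWORD PTR [rbp-0x48],esi
  "89f2"  -- mov edx,esi
  "8b5c243c"  -- mov ebx,DWORD PTR [rsp+0x3c]
  "8b9510ffffff"  -- mov edx,DWORD PTR [rbp-0xf0]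
  "b923000000"  -- mov ecx,0x23
  "c1f802"  -- sar eax,0x2
  "c780f806000000000000"  -- mov DWORD PTR [rax+0x6f8],0x0
  "e80046ffff"  -- call 1008e0
  "e809ffffff"  -- call 104c60
  "e814bbfeff"  -- call 100640
  "e81cf0ffff"  -- call 10ea60
  "e82866ffff"  -- call 100720
  "e82ffcffff"  -- call 107500
  "e83a9efeff"  -- call 1003c0
  "e84668ffff"  -- call 102200
  "e8508effff"  -- call 10d1c0
  "e85b01ffff"  -- call 103d00
  "e869a3feff"  -- call 100560
  "e874befeff"  -- call 100640
  "e87f29ffff"  -- call 100800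
  "e88aa6feff"  -- call 100640
  "e89431ffff"  -- call 100640
  "e89ea4ffff"  -- call 100640
  "e8a8edfeff"  -- call 100720
  "e8b2acfeff"  -- call 100480
  "e8bc91ffff"  -- call 100800
  "e8c809ffff"  -- call 100300
  "e8d0b0feff"  -- call 100720
  "e8db1fffff"  -- call 100640
  "e8e4beffff"  -- call 100640
  "e8ed0bffff"  -- call 100300
  "e8f7b4feff"  -- call 100720
  "e90d020000"  -- jmp 10decf
  "e952ffffff"  -- jmp 10e35a
  "e9a4f6ffff"  -- jmp 113b22
  "e9f6000000"  -- jmp 10b30f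
  "eb8a"  -- jmp 113b22
  "ebe4"  -- jmp 10482b
  "f20f58c0"  -- addsd xmm0,xmm0
  "f20f5e15ecdf0100"  -- divsd xmm2,QWORD PTR [rip+0x1dfec]
  "f30f10542404"  -- movss xmm2,DWORD PTR [rsp+0x4]
  "f30f1075b8"  -- movss xmm6,DWORD PTR [rbp-0x48]
  "f30f11542408"  -- movss DWORD PTR [rsp+0x8],xmm2
  "f30f1175e8"  -- movss DWORD PTR [rbp-0x18],xmm6
  "f30f58e2"  -- addss xmm4,xmm2
  "f30f59f8"  -- mulss xmm7,xmm0
  "f3410f10442414"  -- movss xmm0,DWORD PTR [r12+0x14]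
  "f3410f5c2424"  -- subss xmm4,DWORD PTR [r12]
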